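-- pv_equiv track=rewrite | github.com/jeffbulltech/dnd_experience | backend/app/services/character_builder_rules.py | apply_species_adjustments
-- ===== SOURCE A (Python) =====
-- def apply_species_adjustments(scores: dict[str, int], bonuses: dict[str, int] | None) -> dict[str, int]:
--     adjusted = dict(scores)
--     if not bonuses:
--         return adjusted
--     for ability, bonus in bonuses.items():
--         if ability == "all":
--             for key in adjusted:
--                 adjusted[key] = adjusted.get(key, 0) + bonus
--         else:
--             adjusted[ability] = adjusted.get(ability, 0) + bonus
--     return adjusted
-- ===== SOURCE B (Python) =====
-- def apply_species_adjustments(scores: dict[str, int], bonuses: dict[str, int] | None) -> dict[str, int]: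
--     if not bonuses:
--         return dict(scores)
--     all_bonus = bonuses.get("all", 0)
--     adjusted = {k: v + all_bonus for k, v in scores.items()}
--     for ability, bonus in bonuses.items():
--         if ability != "all":
--             adjusted[ability] = adjusted.get(ability, 0) + bonus
--     return adjusted
-- ===== Notes on version B (the rewrite author's own statement) =====
-- stated objective: simpler
-- what changed: Replaces the nested 'all'-inner-loop over the mutating dict with a single bonuses.get('all', 0) lookup, one comprehension adding that global bonus to the original scores, and one flat pass over the non-'all' entries.
-- outside the precondition, e.g. on apply_species_adjustments({'s': 1}, {'d': 1, 'all': 2}): A returns {'s': 3, 'd': 3}, B returns {'s': 3, 'd': 1}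
import Mathlib
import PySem

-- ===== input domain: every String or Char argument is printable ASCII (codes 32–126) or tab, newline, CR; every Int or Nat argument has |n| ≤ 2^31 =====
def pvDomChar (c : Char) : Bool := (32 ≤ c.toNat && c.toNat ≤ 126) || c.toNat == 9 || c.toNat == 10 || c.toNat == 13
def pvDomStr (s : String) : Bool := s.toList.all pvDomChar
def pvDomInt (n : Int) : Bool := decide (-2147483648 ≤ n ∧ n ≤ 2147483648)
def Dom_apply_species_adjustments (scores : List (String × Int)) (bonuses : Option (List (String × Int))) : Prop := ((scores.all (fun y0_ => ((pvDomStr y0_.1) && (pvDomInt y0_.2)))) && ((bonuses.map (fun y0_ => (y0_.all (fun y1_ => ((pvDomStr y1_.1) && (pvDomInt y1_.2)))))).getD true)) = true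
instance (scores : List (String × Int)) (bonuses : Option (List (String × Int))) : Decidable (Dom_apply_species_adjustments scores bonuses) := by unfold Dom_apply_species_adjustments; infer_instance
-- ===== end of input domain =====

-- B replaces A's nested "all"-inner-loop with one get("all",0) lookup, a comprehension adding
-- that global bonus, and a flat pass over the non-"all" entries (simpler decomposition).


-- ===== PORT A =====
-- inner loop `for key in adjusted: adjusted[key] = adjusted.get(key, 0) + bonus`
def pvApplyAll (d : PySem.Dict String Int) (bonus : Int) : PySem.Dict String Int :=
  d.keys.foldl (fun d' k => d'.insert k (d'.getD k 0 + bonus)) d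

def apply_species_adjustments (scores : List (String × Int)) (bonuses : Option (List (String × Int))) : List (String × Int) :=
  let adjusted := PySem.Dict.ofList scores
  match bonuses with
  | none => adjusted.items
  | some bs =>
    let bd := PySem.Dict.ofList bs
    if bd.items.isEmpty then adjusted.items
    else
      (bd.items.foldl (fun d p =>
        if p.1 = "all" then pvApplyAll d p.2
        else d.insert p.1 (d.getD p.1 0 + p.2)) adjusted).items

-- ===== PORT B =====
def apply_species_adjustments_alt (scores : List (String × Int)) (bonuses : Option (List (String × Int))) : List (String × Int) :=
  match bonuses with
  | none => (PySem.Dict.ofList scores).items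
  | some bs =>
    let bd := PySem.Dict.ofList bs
    if bd.items.isEmpty then (PySem.Dict.ofList scores).items
    else
      let all_bonus := bd.getD "all" 0
      let adjusted := PySem.Dict.ofList ((PySem.Dict.ofList scores).items.map (fun p => (p.1, p.2 + all_bonus)))
      (bd.items.foldl (fun d p =>
        if p.1 ≠ "all" then d.insert p.1 (d.getD p.1 0 + p.2) else d) adjusted).items

-- ===== PRECONDITION & SPEC =====
-- Pre_ excludes a defensible-corner artefact: bonuses dicts whose "all" bonus is nonzero and that
-- list, before "all", an ability absent from scores — there A's "all" pass also covers abilities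
-- that only exist because of an earlier bonus entry, a value dependent on dict insertion order.
def Pre_apply_species_adjustments (scores : List (String × Int)) (bonuses : Option (List (String × Int))) : Prop :=
  ∀ bs ∈ bonuses,
    (PySem.Dict.ofList bs).getD "all" 0 = 0 ∨
      ∀ k ∈ (PySem.Dict.ofList bs).keys.takeWhile (fun s => s ≠ "all"), k ∈ scores.map Prod.fst
instance (scores : List (String × Int)) (bonuses : Option (List (String × Int))) : Decidable (Pre_apply_species_adjustments scores bonuses) := by unfold Pre_apply_species_adjustments; infer_instance

def pvWitness_apply_species_adjustments : (List (String × Int)) × (Option (List (String × Int))) :=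
  ([("str", 10), ("dex", 8)], some [("str", 2), ("all", 1)])

def Spec_apply_species_adjustments (scores : List (String × Int)) (bonuses : Option (List (String × Int))) (out : List (String × Int)) : Prop := out = apply_species_adjustments_alt scores bonuses
instance (scores : List (String × Int)) (bonuses : Option (List (String × Int))) (out : List (String × Int)) : Decidable (Spec_apply_species_adjustments scores bonuses out) := by unfold Spec_apply_species_adjustments; infer_instance

-- ===== CLAIM (what is proved, stated in full; the proofs are below) =====
def Claim_equal_apply_species_adjustments : Prop := ∀ (scores : List (String × Int)) (bonuses : Option (List (String × Int))), Dom_apply_species_adjustments scores bonuses → Pre_apply_species_adjustments scores bonuses → Spec_apply_species_adjustments scores bonuses (apply_species_adjustments scores bonuses)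

-- ===== LEMMAS AND PROOFS =====

-- `pvIns d p` = one non-"all" bonus step; `pvM b d` = d with b added to every value.
def pvIns (d : PySem.Dict String Int) (p : String × Int) : PySem.Dict String Int :=
  d.insert p.1 (d.getD p.1 0 + p.2)

def pvM (b : Int) (d : PySem.Dict String Int) : PySem.Dict String Int :=
  PySem.Dict.mk (d.items.map (fun p => (p.1, p.2 + b)))

theorem pv_get?_mk_map_add (l : List (String × Int)) (b : Int) (k : String) :
    (PySem.Dict.mk (l.map (fun p => (p.1, p.2 + b)))).get? k
      = ((PySem.Dict.mk l).get? k).map (· + b) := by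
  induction l with
  | nil => rfl
  | cons p t ih =>
      obtain ⟨a, v⟩ := p
      simp only [List.map_cons, PySem.Dict.get?_mk_cons]
      split <;> simp [ih]

theorem pvM_get? (b : Int) (d : PySem.Dict String Int) (k : String) :
    (pvM b d).get? k = (d.get? k).map (· + b) :=
  pv_get?_mk_map_add d.items b k

theorem pvM_keys (b : Int) (d : PySem.Dict String Int) : (pvM b d).keys = d.keys := by
  simp only [pvM, PySem.Dict.keys, List.map_map]
  rfl

theorem pvM_zero (d : PySem.Dict String Int) : pvM 0 d = d := by
  apply PySem.Dict.ext
  simp [pvM]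

theorem pvDictEq (d d' : PySem.Dict String Int) (hnd : d.keys.Nodup)
    (hk : d.keys = d'.keys) (hg : ∀ k, d.get? k = d'.get? k) : d = d' := by
  apply PySem.Dict.ext
  rw [PySem.Dict.items_eq_map_keys d hnd 0, PySem.Dict.items_eq_map_keys d' (hk ▸ hnd) 0, hk]
  exact List.map_congr_left (fun k _ => by
    simp [PySem.Dict.getD_eq_get?_getD, hg k])

theorem pv_get?_foldAll_not_mem (ks : List String) (b : Int) (d : PySem.Dict String Int)
    (k : String) (h : k ∉ ks) :
    (ks.foldl (fun d' k' => d'.insert k' (d'.getD k' 0 + b)) d).get? k = d.get? k := by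
  induction ks generalizing d with
  | nil => rfl
  | cons x t ih =>
      simp only [List.mem_cons, not_or] at h
      simp only [List.foldl_cons, ih _ h.2]
      exact PySem.Dict.get?_insert_of_ne _ _ h.1

theorem pv_get?_foldAll_mem (ks : List String) (b : Int) (d : PySem.Dict String Int)
    (k : String) (hnd : ks.Nodup) (hk : k ∈ ks) :
    (ks.foldl (fun d' k' => d'.insert k' (d'.getD k' 0 + b)) d).get? k
      = some (d.getD k 0 + b) := by
  induction ks generalizing d with
  | nil => cases hk
  | cons x t ih =>
      simp only [List.foldl_cons]
      obtain ⟨hx, hnd'⟩ := List.nodup_cons.mp hnd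
      rcases List.mem_cons.mp hk with rfl | hkt
      · rw [pv_get?_foldAll_not_mem t b _ k hx]
        exact PySem.Dict.get?_insert_self _ _ _
      · rw [ih _ hnd' hkt]
        have hne : k ≠ x := fun h => hx (h ▸ hkt)
        rw [PySem.Dict.getD_eq_get?_getD, PySem.Dict.get?_insert_of_ne _ _ hne,
          ← PySem.Dict.getD_eq_get?_getD]

theorem pv_keys_foldAll (ks : List String) (b : Int) (d : PySem.Dict String Int) :
    (ks.foldl (fun d' k' => d'.insert k' (d'.getD k' 0 + b)) d).keys
      = PySem.Set.update d.keys ks := by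
  have h := PySem.Dict.keys_foldl_insert_key ks (fun k => k) (fun d' k' => d'.getD k' 0 + b) d
  simpa using h

theorem pv_set_update_self (s : List String) : PySem.Set.update s s = s := by
  rw [PySem.Set.update_eq_append_filter]
  have h : (PySem.Set.ofList s).filter (fun y => !PySem.Set.contains s y) = [] := by
    apply List.filter_eq_nil_iff.mpr
    intro y hy
    have hm := (PySem.Set.mem_ofList s y).mp hy
    simp [PySem.Set.contains, hm]
  rw [h, List.append_nil]

theorem pvApplyAll_eq_M (d : PySem.Dict String Int) (b : Int) (hnd : d.keys.Nodup) :
    pvApplyAll d b = pvM b d := by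
  apply pvDictEq
  · rw [pvApplyAll, pv_keys_foldAll, pv_set_update_self]; exact hnd
  · rw [pvApplyAll, pv_keys_foldAll, pv_set_update_self, pvM_keys]
  · intro k
    rw [pvApplyAll, pvM_get?]
    by_cases hk : k ∈ d.keys
    · rw [pv_get?_foldAll_mem _ _ _ _ hnd hk]
      obtain ⟨v, hv⟩ : ∃ v, d.get? k = some v := by
        cases h : d.get? k with
        | none => exact absurd ((PySem.Dict.get?_eq_none_iff_not_mem_keys d k).mp h) (by simpa using hk)
        | some v => exact ⟨v, rfl⟩
      rw [PySem.Dict.getD_eq_get?_getD, hv]; simp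
    · rw [pv_get?_foldAll_not_mem _ _ _ _ hk,
        (PySem.Dict.get?_eq_none_iff_not_mem_keys d k).mpr hk]
      rfl

theorem pv_nodup_fold_ins (l : List (String × Int)) (d : PySem.Dict String Int)
    (hnd : d.keys.Nodup) : (l.foldl pvIns d).keys.Nodup := by
  have h := PySem.Dict.nodup_keys_foldl_insert_key l Prod.fst
    (fun d' p => d'.getD p.1 0 + p.2) d hnd
  simpa [pvIns] using h

theorem pvM_ins_comm (d : PySem.Dict String Int) (p : String × Int) (b : Int)
    (hnd : d.keys.Nodup) (hp : p.1 ∈ d.keys) :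
    pvM b (pvIns d p) = pvIns (pvM b d) p := by
  have hc : d.contains p.1 = true := (PySem.Dict.contains_iff_mem_keys d p.1).mpr hp
  have hc' : (pvM b d).contains p.1 = true :=
    (PySem.Dict.contains_iff_mem_keys _ p.1).mpr (pvM_keys b d ▸ hp)
  obtain ⟨v, hv⟩ : ∃ v, d.get? p.1 = some v := by
    cases h : d.get? p.1 with
    | none => exact absurd ((PySem.Dict.get?_eq_none_iff_not_mem_keys d p.1).mp h) (by simpa using hp)
    | some v => exact ⟨v, rfl⟩
  apply pvDictEq
  · rw [pvM_keys]; exact (PySem.Dict.keys_insert_of_contains d _ hc) ▸ hnd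
  · rw [pvM_keys, pvIns, PySem.Dict.keys_insert_of_contains d _ hc,
      pvIns, PySem.Dict.keys_insert_of_contains _ _ hc', pvM_keys]
  · intro k
    rw [pvM_get?, pvIns, pvIns, PySem.Dict.get?_insert, PySem.Dict.get?_insert]
    by_cases hk : k = p.1
    · subst hk
      rw [PySem.Dict.getD_eq_get?_getD, hv, PySem.Dict.getD_eq_get?_getD, pvM_get?, hv]
      simp
      ring
    · simp only [if_neg hk]
      rw [pvM_get?]

theorem pvM_fold_comm (l : List (String × Int)) (d : PySem.Dict String Int) (b : Int)
    (hnd : d.keys.Nodup) (h : ∀ p ∈ l, p.1 ∈ d.keys) :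
    pvM b (l.foldl pvIns d) = l.foldl pvIns (pvM b d) := by
  induction l generalizing d with
  | nil => rfl
  | cons p t ih =>
      simp only [List.foldl_cons]
      have hp := h p (by simp)
      have hc : d.contains p.1 = true := (PySem.Dict.contains_iff_mem_keys d p.1).mpr hp
      have hkeys : (pvIns d p).keys = d.keys := PySem.Dict.keys_insert_of_contains d _ hc
      rw [ih (pvIns d p) (hkeys ▸ hnd) (fun q hq => hkeys ▸ h q (by simp [hq])),
        pvM_ins_comm d p b hnd hp]

theorem pv_mem_keys_ofList (ps : List (String × Int)) (k : String) :
    k ∈ (PySem.Dict.ofList ps).keys ↔ k ∈ ps.map Prod.fst := by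
  have h : (PySem.Dict.ofList ps).keys
      = PySem.Set.update PySem.Dict.empty.keys (ps.map Prod.fst) :=
    PySem.Dict.keys_foldl_insert_key ps Prod.fst (fun _ x => x.2) PySem.Dict.empty
  rw [h]
  simp only [PySem.Dict.keys_empty]
  rw [PySem.Set.update_nil_left]
  exact PySem.Set.mem_ofList _ k

theorem pv_ofList_of_nodup_fst (L : List (String × Int)) (h : (L.map Prod.fst).Nodup) :
    PySem.Dict.ofList L = PySem.Dict.mk L := by
  apply PySem.Dict.ext
  have hit : (L.foldl (fun d a => d.insert a.1 a.2) PySem.Dict.empty).items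
      = PySem.Dict.empty.items ++ L.map (fun a => (a.1, a.2)) :=
    PySem.Dict.items_foldl_insert_fresh L Prod.fst Prod.snd PySem.Dict.empty
      (fun a _ => by simp) h
  simpa using hit

theorem pv_takeWhile_all (xs ys : List String) (h : "all" ∉ xs) :
    (xs ++ "all" :: ys).takeWhile (fun s => s ≠ "all") = xs := by
  induction xs with
  | nil => simp
  | cons x t ih =>
      simp only [List.mem_cons, not_or] at h
      have hx : ¬ x = "all" := fun hh => h.1 hh.symm
      simpa [hx] using congrArg (List.cons x) (ih h.2)

-- ===== VERDICT (by name: the statement is the Claim_ definition above) =====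
theorem apply_species_adjustments_spec : Claim_equal_apply_species_adjustments := by
  intro scores bonuses _ hpre
  unfold Spec_apply_species_adjustments
  unfold Pre_apply_species_adjustments at hpre
  cases bonuses with
  | none => rfl
  | some bs =>
    have hpre' := hpre bs (by simp)
    simp only [apply_species_adjustments, apply_species_adjustments_alt]
    by_cases hemp : (PySem.Dict.ofList bs).items.isEmpty
    · simp [hemp]
    · simp only [hemp, Bool.false_eq_true, if_false]
      have hnds : (PySem.Dict.ofList scores).keys.Nodup := PySem.Dict.nodup_keys_ofList scores
      have hndb : ((PySem.Dict.ofList bs).items.map Prod.fst).Nodup := by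
        simpa [PySem.Dict.keys] using PySem.Dict.nodup_keys_ofList bs
      have hadj : PySem.Dict.ofList
            ((PySem.Dict.ofList scores).items.map
              (fun p => (p.1, p.2 + (PySem.Dict.ofList bs).getD "all" 0)))
          = pvM ((PySem.Dict.ofList bs).getD "all" 0) (PySem.Dict.ofList scores) := by
        rw [pv_ofList_of_nodup_fst]
        · rfl
        · simpa [List.map_map, Function.comp_def, PySem.Dict.keys] using hnds
      rw [hadj]
      by_cases hall : "all" ∈ (PySem.Dict.ofList bs).items.map Prod.fst
      · obtain ⟨p, hpmem, hp1⟩ : ∃ p ∈ (PySem.Dict.ofList bs).items, p.1 = "all" := by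
          simpa using hall
        obtain ⟨l1, l2, hsplit⟩ := List.append_of_mem hpmem
        rw [hsplit] at hndb
        simp only [List.map_append, List.map_cons, hp1] at hndb
        have hall1 : "all" ∉ l1.map Prod.fst := by
          intro hm
          exact (List.nodup_append.mp hndb).2.2 "all" hm "all" (by simp) rfl
        have hall2 : "all" ∉ l2.map Prod.fst :=
          (List.nodup_cons.mp (List.nodup_append.mp hndb).2.1).1
        have hab : (PySem.Dict.ofList bs).getD "all" 0 = p.2 := by
          have hmem' : ("all", p.2) ∈ (PySem.Dict.ofList bs).items := by
            rw [← hp1]; exact hpmem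
          exact PySem.Dict.getD_of_mem_items _ hmem' (PySem.Dict.nodup_keys_ofList bs) 0
        rw [hab, hsplit, List.foldl_append, List.foldl_append, List.foldl_cons,
          List.foldl_cons, if_pos hp1, if_neg (by simp [hp1])]
        have hcongr1A : ∀ (l : List (String × Int)), ("all" ∉ l.map Prod.fst) →
            ∀ (d : PySem.Dict String Int),
            l.foldl (fun d p => if p.1 = "all" then pvApplyAll d p.2
              else d.insert p.1 (d.getD p.1 0 + p.2)) d = l.foldl pvIns d := by
          intro l hl d
          apply PySem.List.foldl_congr_mem
          intro acc x hx
          have : x.1 ≠ "all" := fun h => hl (h ▸ List.mem_map_of_mem hx)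
          simp [this, pvIns]
        have hcongr1B : ∀ (l : List (String × Int)), ("all" ∉ l.map Prod.fst) →
            ∀ (d : PySem.Dict String Int),
            l.foldl (fun d p => if p.1 ≠ "all" then d.insert p.1 (d.getD p.1 0 + p.2)
              else d) d = l.foldl pvIns d := by
          intro l hl d
          apply PySem.List.foldl_congr_mem
          intro acc x hx
          have : x.1 ≠ "all" := fun h => hl (h ▸ List.mem_map_of_mem hx)
          simp [this, pvIns]
        rw [hcongr1A l1 hall1, hcongr1A l2 hall2, hcongr1B l1 hall1, hcongr1B l2 hall2]
        congr 2
        by_cases hz : p.2 = 0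
        · rw [hz, pvM_zero, pvApplyAll_eq_M _ _ (pv_nodup_fold_ins l1 _ hnds), pvM_zero]
        · have hsub : ∀ k ∈ (PySem.Dict.ofList bs).keys.takeWhile (fun s => s ≠ "all"),
              k ∈ scores.map Prod.fst := by
            rcases hpre' with h0 | h
            · exact absurd (hab ▸ h0) hz
            · exact h
          have hkeq : (PySem.Dict.ofList bs).keys
              = l1.map Prod.fst ++ "all" :: l2.map Prod.fst := by
            show (PySem.Dict.ofList bs).items.map Prod.fst = _
            rw [hsplit]; simp [hp1]
          rw [hkeq, pv_takeWhile_all _ _ hall1] at hsub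
          have hsub' : ∀ q ∈ l1, q.1 ∈ (PySem.Dict.ofList scores).keys := by
            intro q hq
            exact (pv_mem_keys_ofList scores q.1).mpr
              (hsub q.1 (List.mem_map_of_mem hq))
          rw [pvApplyAll_eq_M _ _ (pv_nodup_fold_ins l1 _ hnds),
            pvM_fold_comm l1 _ p.2 hnds hsub']
      · have hab0 : (PySem.Dict.ofList bs).getD "all" 0 = 0 := by
          apply PySem.Dict.getD_of_not_contains
          rw [← Bool.not_eq_true]
          intro hc
          exact hall (by simpa [PySem.Dict.keys] using
            (PySem.Dict.contains_iff_mem_keys _ _).mp hc)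
        rw [hab0, pvM_zero]
        congr 1
        apply PySem.List.foldl_congr_mem
        intro acc x hx
        have : x.1 ≠ "all" := fun h => hall (h ▸ List.mem_map_of_mem hx)
        simp [this]
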